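-- pv_equiv track=rewrite | github.com/GiovannieWebb/NSBE-Point-System | app.py | isValidNetID
-- ===== SOURCE A (Python) =====
-- def isValidNetID(NetID):
--     '''
--     Return True if n is a valid netID. Return False otherwise.
--     A valid netID has two or three letters and any amount of number following it.
--
--     Parameter: NetID is of type string.
--     '''
--     assert type(NetID) == str
--
--     if len(NetID) < 3:
--         return False
--
--     if NetID.isdigit() or NetID.isalpha() or not NetID.isalnum():
--         return False
--
--     letterPortion = ''
--     numberPortion = ''
--
--     for character in NetID:
--         if character.isalpha():
--             letterPortion = letterPortion + character
--         if character.isdigit():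
--             numberPortion = numberPortion + character
--
--     if len(letterPortion) < 2 or len(letterPortion) > 3:
--         return False
--
--     if letterPortion + numberPortion != NetID:
--         return False
--
--     return True
-- ===== SOURCE B (Python) =====
-- def isValidNetID(NetID):
--     '''
--     Return True if n is a valid netID. Return False otherwise.
--     A valid netID has two or three letters and any amount of number following it.
--     '''
--     assert type(NetID) == str
--     i = 0
--     while i < len(NetID) and NetID[i].isalpha():
--         i += 1
--     if i < 2 or i > 3:
--         return False
--     return NetID[i:].isdigit()
-- ===== Notes on version B (the rewrite author's own statement) =====
-- stated objective: simpler
-- what changed: Replaces A's one-shot whole-string predicates plus a rebuild-and-compare loop (collect letters and digits separately, re-concatenate, compare with the original) by a single prefix scan: count the leading letters, require 2-3 of them, and check that the (non-empty) remainder is all digits.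
import Mathlib
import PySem

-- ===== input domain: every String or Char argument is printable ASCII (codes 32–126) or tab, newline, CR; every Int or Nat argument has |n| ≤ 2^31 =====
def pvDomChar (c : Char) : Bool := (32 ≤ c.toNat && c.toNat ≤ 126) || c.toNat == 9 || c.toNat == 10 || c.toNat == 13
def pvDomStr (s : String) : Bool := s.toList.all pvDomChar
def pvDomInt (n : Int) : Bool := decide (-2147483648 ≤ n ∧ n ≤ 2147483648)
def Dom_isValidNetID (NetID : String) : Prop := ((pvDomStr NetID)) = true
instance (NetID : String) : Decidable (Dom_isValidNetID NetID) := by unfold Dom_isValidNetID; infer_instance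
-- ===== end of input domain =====

-- B replaces A's whole-string predicates plus rebuild-and-compare loop by a single
-- leading-letter prefix scan followed by an all-digits check of the remainder (objective: simpler).


-- ===== PORT A =====
-- one iteration of A's for-loop: append to letterPortion if alpha, then to numberPortion if digit
def netIdStep (acc : List Char × List Char) (c : Char) : List Char × List Char :=
  let acc1 := if PySem.Chars.isalpha c then (acc.1 ++ [c], acc.2) else acc
  if PySem.Chars.isdigit c then (acc1.1, acc1.2 ++ [c]) else acc1

def isValidNetID (NetID : String) : Bool :=
  let cs := NetID.toList
  if cs.length < 3 then false
  else if PySem.Chars.strIsdigit cs || PySem.Chars.strIsalpha cs || !PySem.Chars.strIsalnum cs then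
    false
  else
    let p := cs.foldl netIdStep ([], [])
    if p.1.length < 2 || p.1.length > 3 then false
    else if p.1 ++ p.2 ≠ cs then false
    else true

-- ===== PORT B =====
def isValidNetID_alt (NetID : String) : Bool :=
  let cs := NetID.toList
  let i := (cs.takeWhile PySem.Chars.isalpha).length   -- the while loop: count leading letters
  if i < 2 || i > 3 then false
  else PySem.Chars.strIsdigit (cs.drop i)              -- NetID[i:].isdigit()

-- ===== PRECONDITION & SPEC =====
def Spec_isValidNetID (NetID : String) (out : Bool) : Prop := out = isValidNetID_alt NetID
instance (NetID : String) (out : Bool) : Decidable (Spec_isValidNetID NetID out) := by unfold Spec_isValidNetID; infer_instance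

-- ===== CLAIM (what is proved, stated in full; the proofs are below) =====
def Claim_equal_isValidNetID : Prop := ∀ (NetID : String), Dom_isValidNetID NetID → Spec_isValidNetID NetID (isValidNetID NetID)

-- ===== LEMMAS AND PROOFS =====

lemma alpha_not_digit {c : Char} (h : PySem.Chars.isalpha c = true) :
    PySem.Chars.isdigit c = false := by
  have h0 : '0'.val.toNat = 48 := rfl
  have h9 : '9'.val.toNat = 57 := rfl
  have hA : 'A'.val.toNat = 65 := rfl
  have hZ : 'Z'.val.toNat = 90 := rfl
  have ha : 'a'.val.toNat = 97 := rfl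
  have hz : 'z'.val.toNat = 122 := rfl
  simp only [PySem.Chars.isalpha, PySem.Chars.isupper, PySem.Chars.islower,
        PySem.Chars.isdigit, Char.le_def, UInt32.le_iff_toNat_le, Bool.or_eq_true,
        decide_eq_true_eq, Bool.and_eq_true, Bool.and_eq_false_iff,
        decide_eq_false_iff_not, h0, h9, hA, hZ, ha, hz] at *
  omega

lemma digit_not_alpha {c : Char} (h : PySem.Chars.isdigit c = true) :
    PySem.Chars.isalpha c = false := by
  cases hA : PySem.Chars.isalpha c with
  | false => rfl
  | true => rw [alpha_not_digit hA] at h; exact absurd h (by simp)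

lemma foldl_netIdStep (cs : List Char) (a b : List Char) :
    cs.foldl netIdStep (a, b) =
      (a ++ cs.filter PySem.Chars.isalpha, b ++ cs.filter PySem.Chars.isdigit) := by
  induction cs generalizing a b with
  | nil => simp
  | cons c rest ih =>
    simp only [List.foldl_cons, List.filter_cons, netIdStep]
    by_cases hA : PySem.Chars.isalpha c = true
    · simp [hA, alpha_not_digit hA, ih]
    · by_cases hD : PySem.Chars.isdigit c = true <;> simp [hA, hD, ih]

lemma drop_length_takeWhile (p : Char → Bool) (cs : List Char) :
    cs.drop (cs.takeWhile p).length = cs.dropWhile p := by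
  induction cs with
  | nil => simp
  | cons c rest ih =>
    by_cases h : p c = true <;> simp [h, ih]

lemma takeWhile_all_append (p : Char → Bool) (l1 l2 : List Char) (h : ∀ c ∈ l1, p c = true) :
    (l1 ++ l2).takeWhile p = l1 ++ l2.takeWhile p := by
  induction l1 with
  | nil => simp
  | cons c rest ih =>
    simp only [List.cons_append, List.takeWhile_cons, h c (by simp), if_true]
    exact congrArg (c :: ·) (ih fun c hc => h c (by simp [hc]))

lemma takeWhile_none (p : Char → Bool) (l : List Char) (h : ∀ c ∈ l, p c = false) :
    l.takeWhile p = [] := by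
  cases l with
  | nil => rfl
  | cons c rest => simp [h c (by simp)]

-- ===== VERDICT (by name: the statement is the Claim_ definition above) =====
theorem isValidNetID_spec : Claim_equal_isValidNetID := by
  intro NetID _
  unfold Spec_isValidNetID
  simp only [isValidNetID, isValidNetID_alt]
  generalize NetID.toList = cs
  rw [drop_length_takeWhile]
  set al := PySem.Chars.isalpha with hal
  set dg := PySem.Chars.isdigit with hdg
  set t := cs.takeWhile al with ht
  set d := cs.dropWhile al with hd
  have hsplit : t ++ d = cs := List.takeWhile_append_dropWhile
  have ht_mem : ∀ c ∈ t, al c = true := fun c hc => List.mem_takeWhile_imp hc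
  rw [Bool.eq_iff_iff]
  have hAiff : (if cs.length < 3 then false
      else if PySem.Chars.strIsdigit cs || PySem.Chars.strIsalpha cs || !PySem.Chars.strIsalnum cs then false
      else
        let p := cs.foldl netIdStep ([], [])
        if p.1.length < 2 || p.1.length > 3 then false
        else if p.1 ++ p.2 ≠ cs then false
        else true) = true ↔
      3 ≤ cs.length ∧ PySem.Chars.strIsdigit cs = false ∧ PySem.Chars.strIsalpha cs = false ∧
      PySem.Chars.strIsalnum cs = true ∧ 2 ≤ (cs.filter al).length ∧ (cs.filter al).length ≤ 3 ∧
      cs.filter al ++ cs.filter dg = cs := by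
    simp only [foldl_netIdStep, List.nil_append, ← hal, ← hdg]
    split_ifs with h1 h2 h3 h4
    · simp only [false_iff]; rintro ⟨hl, -⟩; omega
    · simp only [false_iff]; rintro ⟨-, hd1, ha1, han, -⟩; simp [hd1, ha1, han] at h2
    · simp only [false_iff]
      simp only [Bool.or_eq_true, decide_eq_true_eq] at h3
      rintro ⟨-, -, -, -, hx, hy, -⟩; omega
    · simp only [false_iff]; rintro ⟨-, -, -, -, -, -, hcat⟩; exact h4 hcat
    · simp only [true_iff]
      simp only [Bool.or_eq_true, Bool.not_eq_true', decide_eq_true_eq, not_or, not_lt,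
        Bool.not_eq_true] at h1 h2 h3
      obtain ⟨⟨hq1, hq2⟩, hq3⟩ := h2
      have han : PySem.Chars.strIsalnum cs = true := by
        cases hx : PySem.Chars.strIsalnum cs with
        | true => rfl
        | false => exact absurd hx hq3
      exact ⟨h1, hq1, hq2, han, h3.1, by omega, not_ne_iff.mp h4⟩
  have hBiff : (if t.length < 2 || t.length > 3 then false
      else PySem.Chars.strIsdigit d) = true ↔
      2 ≤ t.length ∧ t.length ≤ 3 ∧ d ≠ [] ∧ ∀ c ∈ d, dg c = true := by
    simp only [PySem.Chars.strIsdigit, ← hdg]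
    split_ifs with h1 <;>
      simp_all [List.all_eq_true] <;> omega
  rw [hAiff, hBiff]
  constructor
  · -- A = true → B = true
    rintro ⟨hlen, hdig, halp, halnum, hL2, hL3, hcat⟩
    have hNd : ∀ c ∈ cs.filter dg, dg c = true := fun c hc => (List.mem_filter.mp hc).2
    have htL : t = cs.filter al := by
      rw [ht]
      conv_lhs => rw [← hcat]
      rw [takeWhile_all_append al _ _ (fun c hc => (List.mem_filter.mp hc).2),
          takeWhile_none al _ (fun c hc => digit_not_alpha (hNd c hc)), List.append_nil]
    have hdN : d = cs.filter dg := by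
      have h2 : t ++ d = t ++ cs.filter dg := by rw [hsplit, htL, hcat]
      exact List.append_cancel_left h2
    refine ⟨by rw [htL]; omega, by rw [htL]; omega, ?_, ?_⟩
    · -- d ≠ []
      intro hnil
      rw [hdN] at hnil
      rw [← hcat, hnil, List.append_nil] at halp
      have : cs ≠ [] := by intro h; rw [h] at hlen; simp at hlen
      rw [← hcat, hnil, List.append_nil] at this
      simp only [PySem.Chars.strIsalpha, ← hal, Bool.and_eq_false_iff, Bool.not_eq_false', List.isEmpty_iff, List.all_eq_false] at halp
      rcases halp with h | ⟨x, hx, hxal⟩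
      · exact this h
      · exact absurd ((List.mem_filter.mp hx).2) (by simp [hxal])
    · rw [hdN]; exact hNd
  · -- B = true → A = true
    rintro ⟨h2, h3, hdne, hddig⟩
    obtain ⟨c0, t', ht'⟩ : ∃ c0 t', t = c0 :: t' := by
      cases htc : t with
      | nil => rw [htc] at h2; simp at h2
      | cons a b => exact ⟨a, b, rfl⟩
    obtain ⟨e0, d', hd'⟩ : ∃ e0 d', d = e0 :: d' := by
      cases hdc : d with
      | nil => exact absurd hdc hdne
      | cons a b => exact ⟨a, b, rfl⟩
    have hfilt_al : cs.filter al = t := by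
      rw [← hsplit, List.filter_append,
          List.filter_eq_self.mpr ht_mem,
          List.filter_eq_nil_iff.mpr
            (fun c hc => by simp only [Bool.not_eq_true]; exact digit_not_alpha (hddig c hc)),
          List.append_nil]
    have hfilt_dg : cs.filter dg = d := by
      rw [← hsplit, List.filter_append,
          List.filter_eq_nil_iff.mpr
            (fun c hc => by simp only [Bool.not_eq_true]; exact alpha_not_digit (ht_mem c hc)),
          List.filter_eq_self.mpr hddig, List.nil_append]
    have hlen : 3 ≤ cs.length := by
      rw [← hsplit, List.length_append, hd']
      simp only [List.length_cons]
      omega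
    refine ⟨hlen, ?_, ?_, ?_, by rw [hfilt_al]; omega, by rw [hfilt_al]; omega,
      by rw [hfilt_al, hfilt_dg]; exact hsplit⟩
    · -- not all digits: c0 is alpha
      have hc0 : al c0 = true := ht_mem c0 (by rw [ht']; simp)
      simp only [PySem.Chars.strIsdigit, ← hdg, Bool.and_eq_false_iff, Bool.not_eq_false', List.all_eq_false]
      right
      exact ⟨c0, by rw [← hsplit, ht']; simp, by simp only [Bool.not_eq_true]; exact alpha_not_digit hc0⟩
    · -- not all alpha: e0 is a digit
      have he0 : dg e0 = true := hddig e0 (by rw [hd']; simp)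
      simp only [PySem.Chars.strIsalpha, ← hal, Bool.and_eq_false_iff, Bool.not_eq_false', List.all_eq_false]
      right
      exact ⟨e0, by rw [← hsplit, hd']; simp, by simp only [Bool.not_eq_true]; exact digit_not_alpha he0⟩
    · -- all alnum
      simp only [PySem.Chars.strIsalnum, PySem.Chars.isalnum, ← hal, ← hdg, Bool.and_eq_true,
        List.all_eq_true]
      constructor
      · rw [← hsplit, ht']; simp
      · intro c hc
        rw [← hsplit] at hc
        rcases List.mem_append.mp hc with hc | hc
        · simp [ht_mem c hc]
        · simp [hddig c hc]
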